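-- pv_equiv track=rewrite | github.com/ocrim1996/HuffmanCodes | HuffmanCode.py | binary_string_decoding
-- ===== SOURCE A (Python) =====
-- def binary_string_decoding(prefix_free_code, binary_string):
--     key_list = list(prefix_free_code.keys())
--     val_list = list(prefix_free_code.values())
--     check_code = ""
--     plaintext = ""
--     for c in binary_string:
--         check_code += c
--         if check_code in prefix_free_code.values():
--             plaintext += key_list[val_list.index(check_code)]
--             check_code = ""
--     return plaintext
-- ===== SOURCE B (Python) =====
-- def binary_string_decoding(prefix_free_code, binary_string):
--     # Invert the code table once (first key wins on duplicate code values),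
--     # then decode by jumping: at each position try the distinct code lengths
--     # in increasing order and take the shortest code that matches there.
--     code_to_key = {}
--     for key, code in prefix_free_code.items():
--         if code not in code_to_key:
--             code_to_key[code] = key
--     lengths = sorted({len(code) for code in code_to_key if code})
--     out = ""
--     i = 0
--     n = len(binary_string)
--     while i < n:
--         matched = False
--         for L in lengths:
--             chunk = binary_string[i:i + L]
--             if len(chunk) == L and chunk in code_to_key:
--                 out += code_to_key[chunk]
--                 i += L
--                 matched = True
--                 break
--         if not matched:
--             break
--     return out
-- ===== Notes on version B (the rewrite author's own statement) =====
-- stated objective: faster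
-- what changed: Replaces A's per-character accumulate-and-rescan (a linear membership test over all code values plus a .index scan at every character) with a reverse dictionary built once and an index that jumps ahead by whole code lengths, trying only the distinct code lengths with O(1) lookups.
import Mathlib
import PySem

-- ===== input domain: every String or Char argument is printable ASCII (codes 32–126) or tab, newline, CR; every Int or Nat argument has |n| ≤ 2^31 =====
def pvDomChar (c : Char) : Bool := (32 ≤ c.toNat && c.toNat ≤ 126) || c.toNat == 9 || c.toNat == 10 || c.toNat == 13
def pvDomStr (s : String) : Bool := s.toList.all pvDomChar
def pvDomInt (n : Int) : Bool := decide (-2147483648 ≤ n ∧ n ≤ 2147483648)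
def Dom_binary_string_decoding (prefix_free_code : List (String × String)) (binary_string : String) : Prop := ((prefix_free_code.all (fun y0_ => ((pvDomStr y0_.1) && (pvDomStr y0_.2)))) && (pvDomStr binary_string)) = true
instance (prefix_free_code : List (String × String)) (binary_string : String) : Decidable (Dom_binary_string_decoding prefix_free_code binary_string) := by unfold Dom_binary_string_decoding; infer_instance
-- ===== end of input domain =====

-- B replaces A's per-character rescans of the value list with a reverse dictionary
-- built once and a cursor that jumps by whole code lengths (objective: faster).

-- ===== PORT A =====
-- loop body of A's 'for c in binary_string'; state = (check_code, plaintext) as char lists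
def bsdStepA (key_list val_list : List String) (st : List Char × List Char) (c : Char) : List Char × List Char :=
  let check := st.1 ++ [c]
  if val_list.contains (String.ofList check) then
    ([], st.2 ++ (match PySem.List.index? val_list (String.ofList check) with
                  | some i => (PySem.List.pyGetD key_list ((i : Nat) : Int) "").toList
                  | none => []))   -- unreachable: guarded by the membership test just above
  else (check, st.2)

def binary_string_decoding (prefix_free_code : List (String × String)) (binary_string : String) : String :=
  let d := PySem.Dict.ofList prefix_free_code
  let key_list := PySem.Dict.keys d
  let val_list := PySem.Dict.values d
  String.ofList (binary_string.toList.foldl (bsdStepA key_list val_list) ([], [])).2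

-- ===== PORT B =====
-- Source B's 'if code not in code_to_key: code_to_key[code] = key' loop
def bsdBuildMap (items : List (String × String)) : PySem.Dict String String :=
  items.foldl (fun m kv => if m.contains kv.2 then m else m.insert kv.2 kv.1) PySem.Dict.empty

-- Source B's inner 'for L in lengths: … break'; chunk = binary_string[i:i+L]
-- (= (s.drop i).take L, PySem.List.slice_natCast_add)
def bsdFind (cm : PySem.Dict String String) (lengths : List Nat) (s : List Char) (i : Nat) :
    Option (String × Nat) :=
  match lengths with
  | [] => none
  | L :: rest =>
    let chunk := (s.drop i).take L
    if chunk.length = L ∧ cm.contains (String.ofList chunk) then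
      some (PySem.Dict.getD cm (String.ofList chunk) "", L)
    else bsdFind cm rest s i

-- Source B's 'while i < n' loop; fuel = n suffices since every match advances i by L ≥ 1
def bsdLoop (cm : PySem.Dict String String) (lengths : List Nat) (s : List Char) :
    Nat → Nat → List Char → List Char
  | 0, _, out => out
  | fuel + 1, i, out =>
    if i < s.length then
      match bsdFind cm lengths s i with
      | some (k, L) => bsdLoop cm lengths s fuel (i + L) (out ++ k.toList)
      | none => out
    else out

def binary_string_decoding_alt (prefix_free_code : List (String × String)) (binary_string : String) : String :=
  let d := PySem.Dict.ofList prefix_free_code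
  let cm := bsdBuildMap d.items
  let lengths := PySem.List.sorted
    (PySem.Set.ofList (((PySem.Dict.keys cm).filter (fun c => c ≠ "")).map (fun c => c.toList.length)))
    (fun x => x) false
  let s := binary_string.toList
  String.ofList (bsdLoop cm lengths s s.length 0 [])

-- ===== PRECONDITION & SPEC =====
def Spec_binary_string_decoding (prefix_free_code : List (String × String)) (binary_string : String) (out : String) : Prop := out = binary_string_decoding_alt prefix_free_code binary_string
instance (prefix_free_code : List (String × String)) (binary_string : String) (out : String) : Decidable (Spec_binary_string_decoding prefix_free_code binary_string out) := by unfold Spec_binary_string_decoding; infer_instance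

-- ===== CLAIM (what is proved, stated in full; the proofs are below) =====
def Claim_equal_binary_string_decoding : Prop := ∀ (prefix_free_code : List (String × String)) (binary_string : String), Dom_binary_string_decoding prefix_free_code binary_string → Spec_binary_string_decoding prefix_free_code binary_string (binary_string_decoding prefix_free_code binary_string)

-- ===== LEMMAS AND PROOFS =====

-- the first key in `items` whose value is v: the common characterisation of both emits
def bsdFirstKey (items : List (String × String)) (v : String) : Option String :=
  (items.find? (fun p => p.2 == v)).map (·.1)

lemma bsdFirstKey_cons_of_ne (kv : String × String) (rest : List (String × String)) (v : String)
    (h : kv.2 ≠ v) : bsdFirstKey (kv :: rest) v = bsdFirstKey rest v := by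
  simp [bsdFirstKey, beq_iff_eq, h]

lemma bsdFirstKey_cons_self (kv : String × String) (rest : List (String × String)) :
    bsdFirstKey (kv :: rest) kv.2 = some kv.1 := by
  simp [bsdFirstKey]

lemma bsdBuildMap_get?_aux (items : List (String × String)) (m : PySem.Dict String String)
    (v : String) :
    ((items.foldl (fun m kv => if m.contains kv.2 then m else m.insert kv.2 kv.1) m).get? v) =
      if m.contains v then m.get? v else bsdFirstKey items v := by
  induction items generalizing m with
  | nil => simp [bsdFirstKey, PySem.Dict.get?_eq_none_iff_contains]
  | cons kv rest ih =>
    simp only [List.foldl_cons, ih]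
    by_cases hc : m.contains kv.2
    · rw [if_pos hc]
      have hne : kv.2 ≠ v ∨ m.contains v := by
        by_cases he : kv.2 = v
        · right; exact he ▸ hc
        · left; exact he
      by_cases hv : m.contains v
      · rw [if_pos hv, if_pos hv]
      · rw [if_neg hv, if_neg hv]
        have he : kv.2 ≠ v := hne.resolve_right hv
        rw [bsdFirstKey_cons_of_ne _ _ _ he]
    · rw [if_neg hc]
      by_cases he : kv.2 = v
      · subst he
        rw [if_pos (PySem.Dict.contains_insert_self m kv.2 kv.1),
          PySem.Dict.get?_insert_self, if_neg (by exact hc), bsdFirstKey_cons_self]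
      · have hcv : (m.insert kv.2 kv.1).contains v = m.contains v := by
          rw [PySem.Dict.contains_insert]
          have : (v == kv.2) = false := beq_eq_false_iff_ne.2 (fun h => he h.symm)
          rw [this, Bool.false_or]
        rw [hcv, bsdFirstKey_cons_of_ne _ _ _ he]
        by_cases hv : m.contains v
        · rw [if_pos hv, if_pos hv,
            PySem.Dict.get?_insert_of_ne m kv.1 (show v ≠ kv.2 from fun h => he h.symm)]
        · rw [if_neg hv, if_neg hv]

lemma bsdBuildMap_get? (items : List (String × String)) (v : String) :
    (bsdBuildMap items).get? v = bsdFirstKey items v := by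
  rw [bsdBuildMap, bsdBuildMap_get?_aux, if_neg]
  simp [PySem.Dict.contains_empty]

lemma bsdFirstKey_isSome (items : List (String × String)) (v : String) :
    (bsdFirstKey items v).isSome = (items.map (·.2)).contains v := by
  induction items with
  | nil => simp [bsdFirstKey]
  | cons kv rest ih =>
    by_cases he : kv.2 = v
    · subst he; rw [bsdFirstKey_cons_self]; simp
    · rw [bsdFirstKey_cons_of_ne _ _ _ he, ih]
      simp [(Ne.symm he : v ≠ kv.2)]

lemma bsdBuildMap_contains (items : List (String × String)) (v : String) :
    (bsdBuildMap items).contains v = (items.map (·.2)).contains v := by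
  rw [PySem.Dict.contains_eq_isSome_get?, bsdBuildMap_get?, bsdFirstKey_isSome]

-- A's key_list[val_list.index(v)] is the first key whose value is v
lemma bsdEmitA_eq_firstKey (items : List (String × String)) (v : String)
    (hv : v ∈ items.map (·.2)) :
    (match PySem.List.index? (items.map (·.2)) v with
     | some i => (PySem.List.pyGetD (items.map (·.1)) ((i : Nat) : Int) "")
     | none => "") = (bsdFirstKey items v).getD "" := by
  induction items with
  | nil => simp at hv
  | cons kv rest ih =>
    by_cases he : kv.2 = v
    · subst he
      rw [bsdFirstKey_cons_self]
      simp only [List.map_cons]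
      rw [PySem.List.index?_cons_self]
      simp [PySem.List.pyGetD_zero_cons]
    · rw [bsdFirstKey_cons_of_ne _ _ _ he]
      have hv' : v ∈ rest.map (·.2) := by
        rw [List.map_cons] at hv
        rcases List.mem_cons.1 hv with h | h
        · exact absurd h.symm he
        · exact h
      simp only [List.map_cons]
      rw [PySem.List.index?_cons_of_ne (h := he)]
      obtain ⟨i, hi⟩ := Option.isSome_iff_exists.1 ((PySem.List.index?_isSome_iff _ _).2 hv')
      rw [hi]
      simp only [Option.map_some]
      rw [← ih hv', hi]
      rw [PySem.List.pyGetD_natCast]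
      simp [PySem.List.pyGetD_natCast, List.getD_eq_getElem?_getD, List.getElem?_map]

lemma bsdFind_none (cm : PySem.Dict String String) (lengths : List Nat) (s : List Char) (i : Nat)
    (h : ∀ L ∈ lengths, ¬(((s.drop i).take L).length = L ∧
        cm.contains (String.ofList ((s.drop i).take L)) = true)) :
    bsdFind cm lengths s i = none := by
  induction lengths with
  | nil => rfl
  | cons L rest ih =>
    rw [bsdFind]
    rw [if_neg (by exact_mod_cast h L (List.mem_cons_self))]
    exact ih (fun L' hL' => h L' (List.mem_cons_of_mem _ hL'))

lemma bsdFind_some (cm : PySem.Dict String String) (lengths : List Nat) (s : List Char) (i : Nat)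
    (L : Nat) (hsort : lengths.Pairwise (· < ·)) (hL : L ∈ lengths)
    (hlen : ((s.drop i).take L).length = L)
    (hmem : cm.contains (String.ofList ((s.drop i).take L)) = true)
    (hmin : ∀ L' ∈ lengths, L' < L → ¬(((s.drop i).take L').length = L' ∧
        cm.contains (String.ofList ((s.drop i).take L')) = true)) :
    bsdFind cm lengths s i = some (PySem.Dict.getD cm (String.ofList ((s.drop i).take L)) "", L) := by
  induction lengths with
  | nil => cases hL
  | cons L0 rest ih =>
    rcases List.mem_cons.1 hL with rfl | hL'
    · rw [bsdFind]
      rw [if_pos ⟨hlen, hmem⟩]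
    · have hlt : L0 < L := (List.pairwise_cons.1 hsort).1 L hL'
      rw [bsdFind]
      rw [if_neg (by exact_mod_cast hmin L0 List.mem_cons_self hlt)]
      exact ih (List.pairwise_cons.1 hsort).2 hL'
        (fun L' h' => hmin L' (List.mem_cons_of_mem _ h'))

lemma bsdLoop_out (cm : PySem.Dict String String) (lengths : List Nat) (s : List Char)
    (fuel i : Nat) (out : List Char) :
    bsdLoop cm lengths s fuel i out = out ++ bsdLoop cm lengths s fuel i [] := by
  induction fuel generalizing i out with
  | zero => simp [bsdLoop]
  | succ f ih =>
    rw [bsdLoop, bsdLoop]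
    by_cases hi : i < s.length
    · rw [if_pos hi, if_pos hi]
      cases hfind : bsdFind cm lengths s i with
      | none => simp
      | some kL =>
        obtain ⟨k, L⟩ := kL
        simp only []
        rw [ih (i + L) (out ++ k.toList), ih (i + L) ([] ++ k.toList)]
        simp
    · rw [if_neg hi, if_neg hi]; simp

-- the invariant proof: A's accumulate-and-test fold equals B's jumping loop
lemma bsdMain (key_list val_list : List String) (cm : PySem.Dict String String)
    (lengths : List Nat) (s : List Char)
    (hsort : lengths.Pairwise (· < ·))
    (hpos : ∀ L ∈ lengths, 1 ≤ L)
    (hcont : ∀ v : String, cm.contains v = val_list.contains v)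
    (hlen : ∀ v : String, v ∈ val_list → v ≠ "" → v.toList.length ∈ lengths)
    (hemit : ∀ v : String, v ∈ val_list →
      (match PySem.List.index? val_list v with
       | some i => (PySem.List.pyGetD key_list ((i : Nat) : Int) "")
       | none => "") = PySem.Dict.getD cm v "") :
    ∀ (rest check plain : List Char) (i fuel : Nat),
      s.drop i = check ++ rest →
      s.length - i ≤ fuel →
      (∀ p : List Char, p ≠ [] → p <+: check → String.ofList p ∉ val_list) →
      (rest.foldl (bsdStepA key_list val_list) (check, plain)).2 =
        plain ++ bsdLoop cm lengths s fuel i [] := by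
  intro rest
  induction rest with
  | nil =>
    intro check plain i fuel hdrop hfuel hinv
    simp only [List.append_nil] at hdrop
    simp only [List.foldl_nil]
    have hloop : bsdLoop cm lengths s fuel i [] = [] := by
      cases fuel with
      | zero => rfl
      | succ f =>
        rw [bsdLoop]
        by_cases hi : i < s.length
        · rw [if_pos hi]
          rw [bsdFind_none]
          intro L hL ⟨h1, h2⟩
          rw [hdrop] at h1 h2
          have hLle : L ≤ check.length := by
            have hlt := List.length_take (l := check) (i := L)
            omega
          have hpre : check.take L <+: check := List.take_prefix L check
          have hne : check.take L ≠ [] := by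
            have := hpos L hL
            intro hcontra
            rw [hcontra] at h1
            simp at h1
            omega
          have := hinv (check.take L) hne hpre
          rw [hcont] at h2
          exact this (List.contains_iff_mem.1 h2)
        · rw [if_neg hi]
    rw [hloop, List.append_nil]
  | cons c rest' ih =>
    intro check plain i fuel hdrop hfuel hinv
    simp only [List.foldl_cons]
    rw [bsdStepA]
    simp only []
    have hi : i < s.length := by
      by_contra hge
      have : s.drop i = [] := List.drop_eq_nil_of_le (by omega)
      rw [this] at hdrop
      exact (List.cons_ne_nil c rest') (List.append_eq_nil_iff.1 hdrop.symm).2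
    have hdrop' : s.drop i = (check ++ [c]) ++ rest' := by
      rw [hdrop]; simp
    by_cases hm : val_list.contains (String.ofList (check ++ [c]))
    · rw [if_pos hm]
      have hvm : String.ofList (check ++ [c]) ∈ val_list := List.contains_iff_mem.1 hm
      set L := check.length + 1 with hLdef
      have hLlen : (String.ofList (check ++ [c])).toList.length = L := by
        simp [hLdef]
      have hLmem : L ∈ lengths := by
        have := hlen _ hvm (by
          intro he
          have : (String.ofList (check ++ [c])).toList = [] := by rw [he]; rfl
          simp at this)
        rwa [hLlen] at this
      have hchunk : (s.drop i).take L = check ++ [c] := by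
        rw [hdrop']
        have : L = (check ++ [c]).length := by simp [hLdef]
        rw [this, List.take_left]
      have hfind : bsdFind cm lengths s i =
          some (PySem.Dict.getD cm (String.ofList (check ++ [c])) "", L) := by
        have := bsdFind_some cm lengths s i L hsort hLmem
          (by rw [hchunk]; simp [hLdef])
          (by rw [hchunk, hcont]; exact hm)
          (fun L' hL' hlt => by
            intro ⟨h1, h2⟩
            have hL'le : L' ≤ check.length := by omega
            have hchunk' : (s.drop i).take L' = check.take L' := by
              rw [hdrop]
              rw [List.take_append_of_le_length hL'le]
            rw [hchunk'] at h1 h2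
            have hne : check.take L' ≠ [] := by
              have := hpos L' hL'
              intro hcontra
              rw [hcontra] at h1
              simp at h1
              omega
            have := hinv (check.take L') hne (List.take_prefix L' check)
            rw [hcont] at h2
            exact this (List.contains_iff_mem.1 h2))
        rw [hchunk] at this
        exact this
      have hL1 : 1 ≤ L := hpos L hLmem
      cases fuel with
      | zero => omega
      | succ f =>
        rw [bsdLoop, if_pos hi, hfind]
        simp only []
        rw [bsdLoop_out]
        have hdropL : s.drop (i + L) = rest' := by
          rw [← List.drop_drop]
          rw [hdrop']
          have : L = (check ++ [c]).length := by simp [hLdef]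
          rw [this, List.drop_left]
        have hIH := ih [] (plain ++ (match PySem.List.index? val_list (String.ofList (check ++ [c])) with
                  | some j => (PySem.List.pyGetD key_list ((j : Nat) : Int) "").toList
                  | none => [])) (i + L) f
          (by rw [hdropL]; simp)
          (by omega)
          (by intro p hp hpre; exact absurd (List.prefix_nil.1 hpre) hp)
        rw [hIH]
        have hemit' := hemit _ hvm
        have htl : (match PySem.List.index? val_list (String.ofList (check ++ [c])) with
                  | some j => (PySem.List.pyGetD key_list ((j : Nat) : Int) "").toList
                  | none => []) = (PySem.Dict.getD cm (String.ofList (check ++ [c])) "").toList := by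
          cases hidx : PySem.List.index? val_list (String.ofList (check ++ [c])) with
          | none =>
            rw [hidx] at hemit'
            simp only [] at hemit'
            rw [← hemit']
            rfl
          | some j =>
            rw [hidx] at hemit'
            simp only [] at hemit'
            rw [← hemit']
        rw [htl]
        simp
    · rw [if_neg hm]
      apply ih (check ++ [c]) plain i fuel hdrop' hfuel
      intro p hp hpre
      rcases List.prefix_concat_iff.1 hpre with rfl | hpre'
      · intro hmem
        exact (Bool.not_eq_true _).mpr ((Bool.eq_false_iff.2 (fun hb => hm hb)))
          (List.contains_iff_mem.2 hmem) |>.elim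
      · exact hinv p hp hpre'

-- glue: instantiating bsdMain for the actual dictionary of the two ports
lemma bsd_toList_ne_nil (v : String) (h : v ≠ "") : v.toList ≠ [] := by
  intro he
  apply h
  have hv : v = String.ofList v.toList := String.ofList_toList.symm
  rw [hv, he]

-- ===== VERDICT (by name: the statement is the Claim_ definition above) =====
theorem binary_string_decoding_spec : Claim_equal_binary_string_decoding := by
  unfold Claim_equal_binary_string_decoding
  intro pfc bs _
  unfold Spec_binary_string_decoding
  unfold binary_string_decoding binary_string_decoding_alt
  simp only []
  set d := PySem.Dict.ofList pfc with hd
  set items := d.items with hitems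
  set cm := bsdBuildMap items with hcm
  set lengths := PySem.List.sorted
    (PySem.Set.ofList (((PySem.Dict.keys cm).filter (fun c => c ≠ "")).map (fun c => c.toList.length)))
    (fun x => x) false with hlengths
  set s := bs.toList with hs
  have hkeys : PySem.Dict.keys d = items.map (·.1) := rfl
  have hvals : PySem.Dict.values d = items.map (·.2) := rfl
  have hmemlen : ∀ L : Nat, L ∈ lengths ↔
      L ∈ ((PySem.Dict.keys cm).filter (fun c => c ≠ "")).map (fun c => c.toList.length) := by
    intro L
    rw [hlengths, PySem.List.mem_sorted]
    exact PySem.Set.mem_ofList _ _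
  have hmain := bsdMain (items.map (·.1)) (items.map (·.2)) cm lengths s
    (by rw [hlengths]; exact PySem.List.sorted_ofList_pairwise_lt _)
    (by
      intro L hL
      obtain ⟨cst, hcf, hclen⟩ := List.mem_map.1 ((hmemlen L).1 hL)
      have hcne : cst ≠ "" := by
        have := (List.mem_filter.1 hcf).2
        simpa using this
      have := bsd_toList_ne_nil cst hcne
      have : 0 < cst.toList.length := List.length_pos_iff.2 this
      omega)
    (by intro v; rw [hcm, bsdBuildMap_contains])
    (by
      intro v hv hvne
      rw [hmemlen]
      apply List.mem_map.2
      refine ⟨v, ?_, rfl⟩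
      apply List.mem_filter.2
      refine ⟨?_, by simpa using hvne⟩
      apply (PySem.Dict.contains_iff_mem_keys cm v).1
      rw [hcm, bsdBuildMap_contains]
      exact List.contains_iff_mem.2 hv)
    (by
      intro v hv
      rw [bsdEmitA_eq_firstKey items v hv, hcm,
        PySem.Dict.getD_eq_get?_getD, bsdBuildMap_get?])
  have := hmain s [] [] 0 s.length (by simp) (by omega)
    (by intro p hp hpre; exact absurd (List.prefix_nil.1 hpre) hp)
  rw [hkeys, hvals]
  rw [this]
  simp
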